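-- pv_equiv track=rewrite | github.com/swynn730/AdventOfCode2022 | day05/day05.py | reveal_message
-- ===== SOURCE A (Python) =====
-- def reveal_message(stack_rearranged, remapped_crate_indices):
-- 	"""
-- 	Figures out the crate at the very top of each stack (column) and combines the result in order to reveal the message.
-- 	"""
-- 	top_crates = []
-- 	for index in remapped_crate_indices:
-- 		for row in stack_rearranged:
-- 			if row[int(index)][0].isalpha():
-- 				top_crates.append(row[int(index)][0])
-- 				break
--
-- 	return "".join(top_crates)
-- ===== SOURCE B (Python) =====
-- def reveal_message(stack_rearranged, remapped_crate_indices):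
--     """Row-major single pass: remember the first alphabetic crate seen per column."""
--     tops = {}
--     for row in stack_rearranged:
--         for index in remapped_crate_indices:
--             k = int(index)
--             if k not in tops:
--                 c = row[k][0]
--                 if c.isalpha():
--                     tops[k] = c
--     return "".join(tops.get(int(index), '') for index in remapped_crate_indices)
-- ===== Notes on version B (the rewrite author's own statement) =====
-- stated objective: alternative
-- what changed: Reverses the loop nesting: instead of re-scanning all rows per column index, B makes one row-major pass maintaining a dict of the first alphabetic crate per column, then joins lookups over the original index list.
import Mathlib
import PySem

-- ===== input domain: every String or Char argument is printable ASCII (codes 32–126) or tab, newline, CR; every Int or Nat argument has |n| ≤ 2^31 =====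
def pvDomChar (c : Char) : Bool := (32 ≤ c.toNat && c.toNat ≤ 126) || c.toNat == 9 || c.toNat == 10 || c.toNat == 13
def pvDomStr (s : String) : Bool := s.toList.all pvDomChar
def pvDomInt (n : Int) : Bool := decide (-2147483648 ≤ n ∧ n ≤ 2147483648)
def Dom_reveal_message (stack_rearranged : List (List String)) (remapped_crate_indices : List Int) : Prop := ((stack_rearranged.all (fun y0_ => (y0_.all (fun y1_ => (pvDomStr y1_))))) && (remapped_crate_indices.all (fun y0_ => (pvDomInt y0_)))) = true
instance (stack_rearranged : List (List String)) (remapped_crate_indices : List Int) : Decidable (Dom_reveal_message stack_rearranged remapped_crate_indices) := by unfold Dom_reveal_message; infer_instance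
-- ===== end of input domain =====

-- B reverses the loop nesting (row-major, first-seen dict per column) instead of re-scanning rows per column; equal return value on Pre_.

-- ===== PORT A =====
-- inner 'for row in stack_rearranged: … break' of A: first row whose cell at idx starts with a letter
def pvFindTopA (rows : List (List String)) (idx : Int) : Option Char :=
  match rows with
  | [] => none
  | row :: rest =>
    match PySem.List.pyGet? row idx with
    | some s =>
      match PySem.Str.pyGet? s 0 with
      | some c => if PySem.Chars.isalpha c then some c else pvFindTopA rest idx
      | none => pvFindTopA rest idx
    | none => pvFindTopA rest idx

def reveal_message (stack_rearranged : List (List String)) (remapped_crate_indices : List Int) : String :=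
  String.mk (remapped_crate_indices.foldl
    (fun acc i =>
      match pvFindTopA stack_rearranged i with
      | some c => acc ++ [c]
      | none => acc) [])

-- ===== PORT B =====
def reveal_message_alt (stack_rearranged : List (List String)) (remapped_crate_indices : List Int) : String :=
  let tops : PySem.Dict Int Char :=
    stack_rearranged.foldl
      (fun t row =>
        remapped_crate_indices.foldl
          (fun t k =>
            if t.contains k then t
            else
              match PySem.List.pyGet? row k with
              | some s =>
                match PySem.Str.pyGet? s 0 with
                | some c => if PySem.Chars.isalpha c then t.insert k c else t
                | none => t
              | none => t)
          t)
      PySem.Dict.empty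
  -- ''.join(tops.get(int(index), '') …): a missing key contributes no character
  String.mk (remapped_crate_indices.flatMap (fun i => (tops.get? i).toList))

-- ===== PRECONDITION & SPEC =====
-- the crate (if any) a single valid cell contributes: some c iff the cell is in range, nonempty and starts with a letter
def pvCell? (row : List String) (k : Int) : Option Char :=
  match PySem.List.pyGet? row k with
  | some s =>
    match PySem.Str.pyGet? s 0 with
    | some c => if PySem.Chars.isalpha c then some c else none
    | none => none
  | none => none

-- Pre_ holds exactly where Python A returns: for each requested column, every row A actually scans
-- (those before which no alphabetic crate was found in that column) has an in-range, nonempty cell;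
-- otherwise row[int(index)] or [0] raises IndexError in A (and likewise in B).
def Pre_reveal_message (stack_rearranged : List (List String)) (remapped_crate_indices : List Int) : Prop :=
  ∀ i ∈ remapped_crate_indices, ∀ n : Nat, ∀ hn : n < stack_rearranged.length,
    (∀ m : Nat, ∀ hm : m < n, pvCell? (stack_rearranged[m]'(Nat.lt_trans hm hn)) i = none) →
    (PySem.List.pyGet? stack_rearranged[n] i).getD "" ≠ ""
instance (stack_rearranged : List (List String)) (remapped_crate_indices : List Int) : Decidable (Pre_reveal_message stack_rearranged remapped_crate_indices) := by unfold Pre_reveal_message; infer_instance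

def pvWitness_reveal_message : List (List String) × List Int := ([["A", "B"], ["C", "D"]], [0, 1])

def Spec_reveal_message (stack_rearranged : List (List String)) (remapped_crate_indices : List Int) (out : String) : Prop := out = reveal_message_alt stack_rearranged remapped_crate_indices
instance (stack_rearranged : List (List String)) (remapped_crate_indices : List Int) (out : String) : Decidable (Spec_reveal_message stack_rearranged remapped_crate_indices out) := by unfold Spec_reveal_message; infer_instance

-- ===== CLAIM (what is proved, stated in full; the proofs are below) =====
def Claim_equal_reveal_message : Prop := ∀ (stack_rearranged : List (List String)) (remapped_crate_indices : List Int), Dom_reveal_message stack_rearranged remapped_crate_indices → Pre_reveal_message stack_rearranged remapped_crate_indices → Spec_reveal_message stack_rearranged remapped_crate_indices (reveal_message stack_rearranged remapped_crate_indices)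

-- ===== LEMMAS AND PROOFS =====

theorem pvFindTopA_cons (row : List String) (rest : List (List String)) (k : Int) :
    pvFindTopA (row :: rest) k = (pvCell? row k).or (pvFindTopA rest k) := by
  cases hg : PySem.List.pyGet? row k with
  | none => simp [pvFindTopA, pvCell?, hg]
  | some s =>
    cases hg0 : PySem.List.pyGet? s.toList 0 with
    | none => simp [pvFindTopA, pvCell?, hg, hg0]
    | some c =>
      by_cases ha : PySem.Chars.isalpha c = true <;>
        simp [pvFindTopA, pvCell?, hg, hg0, ha]

theorem pvStep_get (t : PySem.Dict Int Char) (row : List String) (j k : Int) :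
    ((if t.contains j then t
      else
        match PySem.List.pyGet? row j with
        | some s =>
          match PySem.Str.pyGet? s 0 with
          | some c => if PySem.Chars.isalpha c then t.insert j c else t
          | none => t
        | none => t).get? k)
    = if k = j then (t.get? j).or (pvCell? row j) else t.get? k := by
  cases hc : t.contains j with
  | true =>
    have hs : (t.get? j).isSome = true := by
      rw [← PySem.Dict.contains_eq_isSome_get?]; exact hc
    obtain ⟨v, hv⟩ := Option.isSome_iff_exists.mp hs
    by_cases hk : k = j
    · subst hk; simp [hc, hv]
    · simp [hc, hk]
  | false =>
    have hn : t.get? j = none := by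
      cases h : t.get? j with
      | none => rfl
      | some v => rw [PySem.Dict.contains_eq_isSome_get?, h] at hc; simp at hc
    cases hg : PySem.List.pyGet? row j with
    | none =>
      by_cases hk : k = j
      · subst hk; simp [hc, pvCell?, hg, hn]
      · simp [hc, hg, hk]
    | some s =>
      cases hg0 : PySem.List.pyGet? s.toList 0 with
      | none =>
        by_cases hk : k = j
        · subst hk; simp [hc, pvCell?, hg, hg0, hn]
        · simp [hc, hg, hg0, hk]
      | some c =>
        by_cases ha : PySem.Chars.isalpha c = true
        · by_cases hk : k = j
          · subst hk; simp [hc, pvCell?, hg, hg0, ha, hn, PySem.Dict.get?_insert_self]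
          · simp [hc, hg, hg0, ha, hk, PySem.Dict.get?_insert]
        · by_cases hk : k = j
          · subst hk; simp [hc, pvCell?, hg, hg0, ha, hn]
          · simp [hc, hg, hg0, ha, hk]

theorem pvRow_get (idxs : List Int) (row : List String) (t : PySem.Dict Int Char) (k : Int) :
    ((idxs.foldl
        (fun t k =>
          if t.contains k then t
          else
            match PySem.List.pyGet? row k with
            | some s =>
              match PySem.Str.pyGet? s 0 with
              | some c => if PySem.Chars.isalpha c then t.insert k c else t
              | none => t
            | none => t)
        t).get? k)
    = (t.get? k).or (if k ∈ idxs then pvCell? row k else none) := by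
  induction idxs generalizing t with
  | nil => simp
  | cons j idxs ih =>
    rw [List.foldl_cons, ih, pvStep_get]
    by_cases h : k = j
    · subst h
      simp only [List.mem_cons, true_or, if_true]
      by_cases hm : k ∈ idxs <;> simp [hm, Option.or_assoc, Option.or_self]
    · simp [h, List.mem_cons]

theorem pvRows_get (idxs : List Int) (rows : List (List String)) (t : PySem.Dict Int Char) (k : Int) :
    ((rows.foldl
        (fun t row =>
          idxs.foldl
            (fun t k =>
              if t.contains k then t
              else
                match PySem.List.pyGet? row k with
                | some s =>
                  match PySem.Str.pyGet? s 0 with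
                  | some c => if PySem.Chars.isalpha c then t.insert k c else t
                  | none => t
                | none => t)
            t)
        t).get? k)
    = (t.get? k).or (if k ∈ idxs then pvFindTopA rows k else none) := by
  induction rows generalizing t with
  | nil => simp [pvFindTopA]
  | cons row rest ih =>
    rw [List.foldl_cons, ih, pvRow_get, pvFindTopA_cons]
    by_cases hm : k ∈ idxs <;> simp [hm, Option.or_assoc]

theorem pvFoldA (rows : List (List String)) (idxs : List Int) (acc : List Char) :
    (idxs.foldl
      (fun acc i =>
        match pvFindTopA rows i with
        | some c => acc ++ [c]
        | none => acc) acc)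
    = acc ++ idxs.flatMap (fun i => (pvFindTopA rows i).toList) := by
  induction idxs generalizing acc with
  | nil => simp
  | cons i idxs ih =>
    rw [List.foldl_cons]
    cases h : pvFindTopA rows i <;> simp [h, ih]

-- ===== VERDICT (by name: the statement is the Claim_ definition above) =====
theorem reveal_message_spec : Claim_equal_reveal_message := by
  intro rows idxs _ _
  unfold Spec_reveal_message reveal_message reveal_message_alt
  rw [pvFoldA]
  simp only [List.nil_append]
  congr 1
  apply List.flatMap_congr
  intro i hi
  rw [pvRows_get]
  simp [hi]
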